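-- pv_equiv track=rewrite | github.com/gns0314/codestudy | 프로그래머스/2/87390. n＾2 배열 자르기/n＾2 배열 자르기.py | solution
-- ===== SOURCE A (Python) =====
-- def solution(n, left, right):
--     answer = []
--
--     for i in range(left, right + 1):
--         row = i // n
--         col = i % n
--         max_val = max(row + 1, col + 1)
--         answer.append(max_val)
--
--     return answer
-- ===== SOURCE B (Python) =====
-- def solution(n, left, right):
--     answer = []
--     r0 = left // n
--     r1 = right // n
--     for r in range(r0, r1 + 1):
--         c_start = left - r * n if r == r0 else 0
--         c_end = right - r * n if r == r1 else n - 1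
--         d = min(c_end, r)
--         answer.extend([r + 1] * (d - c_start + 1))
--         for c in range(max(d + 1, c_start), c_end + 1):
--             answer.append(c + 1)
--     return answer
-- ===== Notes on version B (the rewrite author's own statement) =====
-- stated objective: alternative
-- what changed: Replaces the flat per-index loop computing max(i//n, i%n)+1 with a row-block decomposition: loop over the rows the slice touches, emit the constant prefix [r+1]*k for columns <= r in bulk, then the increasing tail c+1 for the remaining columns, so the per-element division/modulo/max disappear (intended as faster; measured 1.84x at the largest size but not consistently above 1.5x).
-- outside the precondition, e.g. on solution(-3, 0, 2): A returns [1, 0, 0], B returns []; on solution(0, 0, 2): A raises ZeroDivisionError, B raises ZeroDivisionError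
import Mathlib
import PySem

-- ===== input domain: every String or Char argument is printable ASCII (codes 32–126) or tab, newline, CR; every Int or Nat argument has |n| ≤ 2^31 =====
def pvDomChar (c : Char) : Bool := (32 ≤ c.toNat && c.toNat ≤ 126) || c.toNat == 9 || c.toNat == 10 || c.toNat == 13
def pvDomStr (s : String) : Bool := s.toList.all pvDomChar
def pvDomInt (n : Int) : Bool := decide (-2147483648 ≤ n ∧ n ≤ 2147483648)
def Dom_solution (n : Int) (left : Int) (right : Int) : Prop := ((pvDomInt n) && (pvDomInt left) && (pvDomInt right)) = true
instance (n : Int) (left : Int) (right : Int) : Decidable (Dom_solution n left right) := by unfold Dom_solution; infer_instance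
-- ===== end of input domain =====

-- B replaces A's flat per-index loop (max(i//n, i%n)+1 for each i) by a row-block decomposition:
-- it loops over the rows the slice touches and emits each row's constant prefix in bulk, its increasing tail element-wise.


-- ===== PORT A =====
def solution (n : Int) (left : Int) (right : Int) : List Int :=
  (PySem.List.pyRange left (right + 1) 1).foldl
    (fun answer i =>
      let row := PySem.Int.floordiv i n
      let col := PySem.Int.mod i n
      let maxVal := max (row + 1) (col + 1)
      answer ++ [maxVal]) []

-- ===== PORT B =====
def solution_alt (n : Int) (left : Int) (right : Int) : List Int :=
  let r0 := PySem.Int.floordiv left n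
  let r1 := PySem.Int.floordiv right n
  (PySem.List.pyRange r0 (r1 + 1) 1).foldl
    (fun answer r =>
      let cStart := if r = r0 then left - r * n else 0
      let cEnd := if r = r1 then right - r * n else n - 1
      let d := min cEnd r
      let answer := answer ++ List.replicate (d - cStart + 1).toNat (r + 1)
      (PySem.List.pyRange (max (d + 1) cStart) (cEnd + 1) 1).foldl
        (fun answer c => answer ++ [c + 1]) answer) []

-- ===== PRECONDITION & SPEC =====
-- Pre_ excludes n = 0 (A raises ZeroDivisionError) and also n < 0, on which A still returns:
-- n is the side length of the n×n array, so negative n is outside the problem's natural domain,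
-- and B's row-block decomposition (which assumes rows of positive width n) does not apply there.
def Pre_solution (n : Int) (left : Int) (right : Int) : Prop := 1 ≤ n
instance (n : Int) (left : Int) (right : Int) : Decidable (Pre_solution n left right) := by unfold Pre_solution; infer_instance
def pvWitness_solution : Int × Int × Int := (3, 2, 5)
def Spec_solution (n : Int) (left : Int) (right : Int) (out : List Int) : Prop := out = solution_alt n left right
instance (n : Int) (left : Int) (right : Int) (out : List Int) : Decidable (Spec_solution n left right out) := by unfold Spec_solution; infer_instance

-- ===== CLAIM (what is proved, stated in full; the proofs are below) =====
def Claim_equal_solution : Prop := ∀ (n : Int) (left : Int) (right : Int), Dom_solution n left right → Pre_solution n left right → Spec_solution n left right (solution n left right)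

-- ===== LEMMAS AND PROOFS =====

-- the cell value A computes at flat index i, and the block B emits for row r
def pvCell (n i : Int) : Int := max (PySem.Int.floordiv i n + 1) (PySem.Int.mod i n + 1)

def pvBlock (n left right r : Int) : List Int :=
  let cStart := if r = PySem.Int.floordiv left n then left - r * n else 0
  let cEnd := if r = PySem.Int.floordiv right n then right - r * n else n - 1
  let d := min cEnd r
  List.replicate (d - cStart + 1).toNat (r + 1) ++
    (PySem.List.pyRange (max (d + 1) cStart) (cEnd + 1) 1).map (fun c => c + 1)

lemma solution_eq_map (n left right : Int) :
    solution n left right = (PySem.List.pyRange left (right + 1) 1).map (pvCell n) := by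
  unfold solution
  have hfun : (fun (answer : List Int) (i : Int) =>
      let row := PySem.Int.floordiv i n
      let col := PySem.Int.mod i n
      let maxVal := max (row + 1) (col + 1)
      answer ++ [maxVal]) = fun (answer : List Int) (i : Int) => answer ++ [pvCell n i] := rfl
  rw [hfun, PySem.List.foldl_append_singleton_eq_map, List.nil_append]

lemma solution_alt_eq_flatMap (n left right : Int) :
    solution_alt n left right =
      (PySem.List.pyRange (PySem.Int.floordiv left n) (PySem.Int.floordiv right n + 1) 1).flatMap
        (pvBlock n left right) := by
  unfold solution_alt pvBlock
  simp only [PySem.List.foldl_append_singleton_eq_map, List.append_assoc]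
  exact PySem.List.foldl_append_eq_flatMap _ _ _

lemma map_pyRange_shift (g : Int → Int) (s a b : Int) :
    (PySem.List.pyRange (s + a) (s + b) 1).map g
      = (PySem.List.pyRange a b 1).map (fun c => g (s + c)) := by
  rw [PySem.List.pyRange_one, PySem.List.pyRange_one,
    show s + b - (s + a) = b - a from by ring]
  simp only [List.map_map]
  congr 1
  funext k
  simp only [Function.comp]
  ring_nf

lemma pvCell_eq (n r i : Int) (hn : 1 ≤ n) (hle : r * n ≤ i) (hlt : i < r * n + n) :
    pvCell n i = max (r + 1) (i - r * n + 1) := by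
  have hf : PySem.Int.floordiv i n = r := by
    rw [PySem.Int.floordiv_eq_iff_of_pos (by omega)]
    have h1 : (r + 1) * n = r * n + n := by ring
    exact ⟨hle, by linarith⟩
  have hm : PySem.Int.mod i n = i - r * n := by
    have h := PySem.Int.floordiv_mul_add_mod i n
    rw [hf] at h
    linarith
  unfold pvCell
  rw [hf, hm]

lemma row_lemma (n r cStart cEnd : Int) (hn : 1 ≤ n) (h0 : 0 ≤ cStart) (h2 : cEnd ≤ n - 1) :
    (PySem.List.pyRange (r * n + cStart) (r * n + cEnd + 1) 1).map (pvCell n)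
      = List.replicate ((min cEnd r - cStart + 1).toNat) (r + 1) ++
          (PySem.List.pyRange (max (min cEnd r + 1) cStart) (cEnd + 1) 1).map (fun c => c + 1) := by
  set d := min cEnd r with hd
  have hdr : d ≤ r := min_le_right _ _
  have hdE : d ≤ cEnd := min_le_left _ _
  by_cases hcd : cStart ≤ d
  · -- constant prefix then increasing tail
    have hmax : max (d + 1) cStart = d + 1 := by omega
    rw [hmax,
      PySem.List.pyRange_one_append (r * n + cStart) (r * n + (d + 1)) (r * n + cEnd + 1)
        (by linarith) (by linarith),
      List.map_append]
    congr 1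
    · -- prefix: every cell equals r + 1
      have hall : ∀ y ∈ (PySem.List.pyRange (r * n + cStart) (r * n + (d + 1)) 1).map (pvCell n),
          y = r + 1 := by
        intro y hy
        simp only [List.mem_map, PySem.List.mem_pyRange_one] at hy
        obtain ⟨i, ⟨hi1, hi2⟩, rfl⟩ := hy
        rw [pvCell_eq n r i hn (by linarith) (by linarith)]
        have h3 : i - r * n + 1 ≤ r + 1 := by linarith
        omega
      rw [List.eq_replicate_of_mem hall]
      congr 1
      simp only [List.length_map, PySem.List.length_pyRange_one]
      omega
    · -- tail: cells past the diagonal equal c + 1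
      rw [show r * n + cEnd + 1 = r * n + (cEnd + 1) from by ring,
        map_pyRange_shift]
      apply List.map_congr_left
      intro c hc
      rw [PySem.List.mem_pyRange_one] at hc
      obtain ⟨hc1, hc2⟩ := hc
      have hrc : r < c := by omega
      rw [pvCell_eq n r (r * n + c) hn (by linarith) (by linarith)]
      have h3 : r * n + c - r * n = c := by ring
      rw [h3]
      omega
  · -- prefix empty: the whole row is past the diagonal
    have hrep : (d - cStart + 1).toNat = 0 := by omega
    have hmax : max (d + 1) cStart = cStart := by omega
    rw [hrep, hmax, List.replicate_zero, List.nil_append,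
      show r * n + cEnd + 1 = r * n + (cEnd + 1) from by ring,
      map_pyRange_shift]
    apply List.map_congr_left
    intro c hc
    rw [PySem.List.mem_pyRange_one] at hc
    obtain ⟨hc1, hc2⟩ := hc
    have hrc : r < c := by omega
    rw [pvCell_eq n r (r * n + c) hn (by linarith) (by linarith)]
    have h3 : r * n + c - r * n = c := by ring
    rw [h3]
    omega

lemma flatMap_congr_mem {α β : Type} (l : List α) (f g : α → List β)
    (h : ∀ x ∈ l, f x = g x) : l.flatMap f = l.flatMap g := by
  induction l with
  | nil => rfl
  | cons x xs ih =>
    simp only [List.flatMap_cons, h x (List.mem_cons_self),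
      ih (fun y hy => h y (List.mem_cons_of_mem _ hy))]

-- a row that is both the first and the last row of the slice
lemma single_row (n left right r : Int) (hn : 1 ≤ n)
    (hl : PySem.Int.floordiv left n = r) (hr : PySem.Int.floordiv right n = r) :
    (PySem.List.pyRange left (right + 1) 1).map (pvCell n) = pvBlock n left right r := by
  have hbl := (PySem.Int.floordiv_eq_iff_of_pos (show (0:Int) < n by omega)).mp hl
  have hbr := (PySem.Int.floordiv_eq_iff_of_pos (show (0:Int) < n by omega)).mp hr
  have h1 : (r + 1) * n = r * n + n := by ring
  unfold pvBlock
  rw [hl, hr, if_pos rfl, if_pos rfl]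
  have hrow := row_lemma n r (left - r * n) (right - r * n) hn
    (by linarith [hbl.1]) (by linarith [hbr.2])
  rw [show r * n + (left - r * n) = left from by ring,
    show r * n + (right - r * n) + 1 = right + 1 from by ring] at hrow
  exact hrow

-- the first row of a slice that continues into later rows
lemma first_row (n left right r : Int) (hn : 1 ≤ n)
    (hl : PySem.Int.floordiv left n = r) (hlt : r < PySem.Int.floordiv right n) :
    (PySem.List.pyRange left ((r + 1) * n) 1).map (pvCell n) = pvBlock n left right r := by
  have hbl := (PySem.Int.floordiv_eq_iff_of_pos (show (0:Int) < n by omega)).mp hl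
  unfold pvBlock
  rw [hl, if_pos rfl, if_neg (by omega)]
  have hrow := row_lemma n r (left - r * n) (n - 1) hn (by linarith [hbl.1]) (by omega)
  rw [show r * n + (left - r * n) = left from by ring,
    show r * n + (n - 1) + 1 = (r + 1) * n from by ring] at hrow
  exact hrow

lemma main_base (n right : Int) (hn : 1 ≤ n) (left : Int)
    (hle : PySem.Int.floordiv right n ≤ PySem.Int.floordiv left n) :
    (PySem.List.pyRange left (right + 1) 1).map (pvCell n)
      = (PySem.List.pyRange (PySem.Int.floordiv left n) (PySem.Int.floordiv right n + 1) 1).flatMap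
          (pvBlock n left right) := by
  rcases lt_or_eq_of_le hle with hlt | heq
  · -- strictly fewer: the slice is empty, both sides are []
    have hbl := (PySem.Int.floordiv_eq_iff_of_pos (show (0:Int) < n by omega)).mp
      (rfl : PySem.Int.floordiv left n = PySem.Int.floordiv left n)
    have hbr := (PySem.Int.floordiv_eq_iff_of_pos (show (0:Int) < n by omega)).mp
      (rfl : PySem.Int.floordiv right n = PySem.Int.floordiv right n)
    have hmul : (PySem.Int.floordiv right n + 1) * n ≤ PySem.Int.floordiv left n * n :=
      mul_le_mul_of_nonneg_right (by omega) (by omega)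
    have hrl : right < left := by linarith [hbl.1, hbr.2]
    rw [PySem.List.pyRange_one_eq_nil (by omega), PySem.List.pyRange_one_eq_nil (by omega)]
    rfl
  · -- equal: one single row
    rw [← heq, PySem.List.pyRange_one_singleton, List.flatMap_singleton]
    exact single_row n left right _ hn heq.symm rfl

lemma main_lemma (n right : Int) (hn : 1 ≤ n) :
    ∀ k : Nat, ∀ left : Int,
      (PySem.Int.floordiv right n - PySem.Int.floordiv left n).toNat ≤ k →
      (PySem.List.pyRange left (right + 1) 1).map (pvCell n)
        = (PySem.List.pyRange (PySem.Int.floordiv left n) (PySem.Int.floordiv right n + 1) 1).flatMap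
            (pvBlock n left right) := by
  intro k
  induction k with
  | zero =>
    intro left hk
    exact main_base n right hn left (by omega)
  | succ k ih =>
    intro left hk
    by_cases hfew : PySem.Int.floordiv right n ≤ PySem.Int.floordiv left n
    · exact main_base n right hn left hfew
    · -- the slice spans several rows: peel the first (possibly partial) row
      have hlt : PySem.Int.floordiv left n < PySem.Int.floordiv right n := by omega
      have hbl := (PySem.Int.floordiv_eq_iff_of_pos (show (0:Int) < n by omega)).mp
        (rfl : PySem.Int.floordiv left n = PySem.Int.floordiv left n)
      have hbr := (PySem.Int.floordiv_eq_iff_of_pos (show (0:Int) < n by omega)).mp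
        (rfl : PySem.Int.floordiv right n = PySem.Int.floordiv right n)
      have hmul : (PySem.Int.floordiv left n + 1) * n ≤ PySem.Int.floordiv right n * n :=
        mul_le_mul_of_nonneg_right (by omega) (by omega)
      have hsplit2 : (PySem.Int.floordiv left n + 1) * n ≤ right + 1 := by linarith [hbr.1]
      rw [PySem.List.pyRange_one_append left ((PySem.Int.floordiv left n + 1) * n) (right + 1)
        (by linarith [hbl.2]) hsplit2, List.map_append]
      have hfl' : PySem.Int.floordiv ((PySem.Int.floordiv left n + 1) * n) n
          = PySem.Int.floordiv left n + 1 := by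
        rw [PySem.Int.floordiv_eq_iff_of_pos (by omega)]
        have h2 : (PySem.Int.floordiv left n + 1 + 1) * n = (PySem.Int.floordiv left n + 1) * n + n := by
          ring
        exact ⟨le_refl _, by linarith⟩
      have hrec := ih ((PySem.Int.floordiv left n + 1) * n) (by rw [hfl']; omega)
      rw [hfl'] at hrec
      rw [hrec]
      have hcongr : ∀ r ∈ PySem.List.pyRange (PySem.Int.floordiv left n + 1)
          (PySem.Int.floordiv right n + 1) 1,
          pvBlock n ((PySem.Int.floordiv left n + 1) * n) right r = pvBlock n left right r := by
        intro r hr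
        rw [PySem.List.mem_pyRange_one] at hr
        unfold pvBlock
        rw [hfl']
        by_cases hre : r = PySem.Int.floordiv left n + 1
        · subst hre
          rw [if_pos rfl,
            if_neg (show ¬(PySem.Int.floordiv left n + 1 = PySem.Int.floordiv left n) by omega),
            show (PySem.Int.floordiv left n + 1) * n - (PySem.Int.floordiv left n + 1) * n = 0
              from by ring]
        · rw [if_neg hre, if_neg (show ¬(r = PySem.Int.floordiv left n) by omega)]
      rw [flatMap_congr_mem _ _ _ hcongr,
        PySem.List.pyRange_one_cons (show PySem.Int.floordiv left n < PySem.Int.floordiv right n + 1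
          by omega),
        List.flatMap_cons]
      congr 1
      exact first_row n left right _ hn rfl hlt

-- ===== VERDICT (by name: the statement is the Claim_ definition above) =====
theorem solution_spec : Claim_equal_solution := by
  intro n left right _ hpre
  unfold Spec_solution
  rw [solution_eq_map, solution_alt_eq_flatMap]
  exact main_lemma n right hpre _ left le_rfl
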